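-- pv_equiv track=rewrite | github.com/benhoyle/patentdata | patentdata.py | class_statistics
-- ===== SOURCE A (Python) =====
-- def class_statistics(list_in):
--     """ For a list of classifications determine counts at first three levels. """
--     section_list = [item['section'] for item in list_in]
--     section_class_list = ["".join([item['section'], item['first_class']]) for item in list_in]
--     section_subclass_list = ["".join([item['section'], item['first_class'], item['subclass']]) for item in list_in]
--     from collections import Counter
--
--     section_counter = Counter(section_list)
--     section_class_counter = Counter(section_class_list)
--     section_subclass_counter = Counter(section_subclass_list)
--     return {
--         "section": section_counter,
--         "first_class": section_class_counter,
--         "subclass":section_subclass_counter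
--         }
-- ===== SOURCE B (Python) =====
-- def class_statistics(list_in):
--     """For a list of classifications determine counts at first three levels.
--
--     Different decomposition: first group identical (section, first_class, subclass)
--     triples into one Counter of triples, then aggregate each distinct triple's
--     multiplicity into the three level counters (work per distinct triple, not per item).
--     Counter preserves first-occurrence order, so key order matches the per-item scan."""
--     from collections import Counter
--     triple_counts = Counter(
--         (item['section'], item['first_class'], item['subclass']) for item in list_in)
--     section_counter = Counter()
--     section_class_counter = Counter()
--     section_subclass_counter = Counter()
--     for (s, c, u), n in triple_counts.items():
--         section_counter[s] += n
--         section_class_counter[s + c] += n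
--         section_subclass_counter[s + c + u] += n
--     return {
--         "section": section_counter,
--         "first_class": section_class_counter,
--         "subclass": section_subclass_counter,
--         }
-- ===== Notes on version B (the rewrite author's own statement) =====
-- stated objective: alternative
-- what changed: Instead of scanning the items and counting each of the three keys directly, B first groups identical (section, first_class, subclass) triples into a single Counter of triples and then aggregates each distinct triple's multiplicity at once into the three level counters, so the per-level work is done per distinct triple rather than per item.
-- outside the precondition, e.g. on class_statistics([{'section': 'A'}]): A raises KeyError, B raises KeyError
import Mathlib
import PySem

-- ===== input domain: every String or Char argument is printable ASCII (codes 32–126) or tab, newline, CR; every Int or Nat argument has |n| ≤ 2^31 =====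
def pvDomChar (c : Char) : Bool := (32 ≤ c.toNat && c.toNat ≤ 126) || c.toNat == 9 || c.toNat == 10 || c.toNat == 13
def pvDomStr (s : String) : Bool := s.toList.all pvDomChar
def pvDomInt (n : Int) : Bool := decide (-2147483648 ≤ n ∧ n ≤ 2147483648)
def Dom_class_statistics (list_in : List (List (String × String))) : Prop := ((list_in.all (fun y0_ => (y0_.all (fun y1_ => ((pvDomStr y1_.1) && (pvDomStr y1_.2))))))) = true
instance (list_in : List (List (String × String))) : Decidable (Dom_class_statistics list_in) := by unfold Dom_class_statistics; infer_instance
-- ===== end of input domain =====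

-- B groups identical (section, first_class, subclass) triples into one Counter of triples,
-- then aggregates each distinct triple's multiplicity into the three level counters
-- (objective: alternative decomposition — per-distinct-triple aggregation). Return value only.

-- item[k]: first-match dict lookup; total with "" default, Pre_ excludes the KeyError inputs.
def pyItem (item : List (String × String)) (k : String) : String :=
  ((PySem.Dict.mk item).get? k).getD ""

-- ===== PORT A =====
def class_statistics (list_in : List (List (String × String))) : List (String × List (String × Int)) :=
  let section_list := list_in.map (fun item => pyItem item "section")
  let section_class_list := list_in.map (fun item =>
    pyItem item "section" ++ pyItem item "first_class")
  let section_subclass_list := list_in.map (fun item =>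
    pyItem item "section" ++ pyItem item "first_class" ++ pyItem item "subclass")
  let section_counter := PySem.Dict.counter section_list
  let section_class_counter := PySem.Dict.counter section_class_list
  let section_subclass_counter := PySem.Dict.counter section_subclass_list
  [("section", section_counter.items),
   ("first_class", section_class_counter.items),
   ("subclass", section_subclass_counter.items)]

-- ===== PORT B =====
def class_statistics_alt (list_in : List (List (String × String))) : List (String × List (String × Int)) :=
  let triple_counts := PySem.Dict.counter (list_in.map (fun item =>
    (pyItem item "section", pyItem item "first_class", pyItem item "subclass")))
  let t := triple_counts.items.foldl
    (fun (t : PySem.Dict String Int × PySem.Dict String Int × PySem.Dict String Int) p =>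
      (t.1.modify p.1.1 0 (· + p.2),
       t.2.1.modify (p.1.1 ++ p.1.2.1) 0 (· + p.2),
       t.2.2.modify (p.1.1 ++ p.1.2.1 ++ p.1.2.2) 0 (· + p.2)))
    (PySem.Dict.empty, PySem.Dict.empty, PySem.Dict.empty)
  [("section", t.1.items), ("first_class", t.2.1.items), ("subclass", t.2.2.items)]

-- ===== PRECONDITION & SPEC =====
-- Pre_ excludes exactly the items missing one of the three keys, where A raises KeyError.
def Pre_class_statistics (list_in : List (List (String × String))) : Prop :=
  (list_in.all (fun item => (PySem.Dict.mk item).contains "section"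
    && (PySem.Dict.mk item).contains "first_class"
    && (PySem.Dict.mk item).contains "subclass")) = true
instance (list_in : List (List (String × String))) : Decidable (Pre_class_statistics list_in) := by unfold Pre_class_statistics; infer_instance
def pvWitness_class_statistics : (List (List (String × String))) :=
  [[("section", "A"), ("first_class", "01"), ("subclass", "B")],
   [("section", "A"), ("first_class", "02"), ("subclass", "C")]]

def Spec_class_statistics (list_in : List (List (String × String))) (out : List (String × List (String × Int))) : Prop := out = class_statistics_alt list_in
instance (list_in : List (List (String × String))) (out : List (String × List (String × Int))) : Decidable (Spec_class_statistics list_in out) := by unfold Spec_class_statistics; infer_instance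

-- ===== CLAIM (what is proved, stated in full; the proofs are below) =====
def Claim_equal_class_statistics : Prop := ∀ (list_in : List (List (String × String))), Dom_class_statistics list_in → Pre_class_statistics list_in → Spec_class_statistics list_in (class_statistics list_in)

-- ===== LEMMAS AND PROOFS =====

-- Deduplicating before mapping does not change the deduplicated image.
theorem ofList_map_ofList {α : Type} [BEq α] [LawfulBEq α] (key : α → String) (xs : List α) :
    PySem.Set.ofList ((PySem.Set.ofList xs).map key) = PySem.Set.ofList (xs.map key) := by
  induction xs using List.reverseRecOn with
  | nil => rfl
  | append_singleton xs x ih =>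
    rw [PySem.Set.ofList_append_singleton, List.map_append, List.map_singleton,
      PySem.Set.ofList_append_singleton, ← ih]
    by_cases hx : x ∈ xs
    · rw [PySem.Set.add_of_mem ((PySem.Set.mem_ofList _ _).mpr hx)]
      have hk : key x ∈ (PySem.Set.ofList xs).map key :=
        List.mem_map_of_mem ((PySem.Set.mem_ofList _ _).mpr hx)
      rw [PySem.Set.add_of_mem ((PySem.Set.mem_ofList _ _).mpr hk)]
    · rw [PySem.Set.add_of_not_mem (fun h => hx ((PySem.Set.mem_ofList _ _).mp h)),
        List.map_append, List.map_singleton, PySem.Set.ofList_append_singleton]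

-- getD of a weighted modify-add fold: initial value plus the matching weights.
theorem getD_foldl_modify_key_add {α : Type} (key : α → String)
    (ps : List (α × Int)) :
    ∀ (d : PySem.Dict String Int) (k : String),
      (ps.foldl (fun d p => d.modify (key p.1) 0 (· + p.2)) d).getD k 0
        = d.getD k 0 + (ps.map (fun p => if key p.1 = k then p.2 else 0)).sum := by
  induction ps with
  | nil => intro d k; simp
  | cons p ps ih =>
    intro d k
    rw [List.foldl_cons, ih, PySem.Dict.getD_modify, List.map_cons, List.sum_cons]
    by_cases h : k = key p.1
    · subst h; simp only [if_true]; ring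
    · rw [if_neg h, if_neg (fun hh => h hh.symm)]; ring

-- One distinguished element of a Nodup list contributes exactly its own indicator.
theorem sum_indicator_single {α : Type} [DecidableEq α] (key : α → String) (k : String)
    (y : α) : ∀ (S : List α), S.Nodup → y ∈ S →
    (S.map (fun t => if key t = k then (if t = y then (1 : Int) else 0) else 0)).sum
      = (if key y = k then (1 : Int) else 0) := by
  intro S
  induction S with
  | nil => intro _ h; cases h
  | cons a S ih =>
    intro hnd hy
    rcases List.mem_cons.mp hy with rfl | hyS
    · have hz : (S.map (fun t => if key t = k then (if t = y then (1 : Int) else 0) else 0)).sum = 0 := by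
        apply List.sum_eq_zero
        intro x hx
        rcases List.mem_map.mp hx with ⟨t, htS, rfl⟩
        have hty : t ≠ y := fun h => (List.nodup_cons.mp hnd).1 (h ▸ htS)
        simp [hty]
      simp [hz]
    · have hay : a ≠ y := fun h => (List.nodup_cons.mp hnd).1 (h ▸ hyS)
      rw [List.map_cons, List.sum_cons, ih (List.nodup_cons.mp hnd).2 hyS]
      simp [hay]

-- Grouping: summing per-distinct-element counts of l over any Nodup superset of l's
-- elements equals counting the key's image in l.map key.
theorem sum_counts_eq_count_map {α : Type} [DecidableEq α] [BEq α] [LawfulBEq α]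
    (key : α → String) (k : String) (S : List α) (hnd : S.Nodup) :
    ∀ (l : List α), (∀ t, t ∈ l → t ∈ S) →
      (S.map (fun t => if key t = k then (l.count t : Int) else 0)).sum
        = ((l.map key).count k : Int) := by
  intro l
  induction l with
  | nil => intro _; simp
  | cons y l ih =>
    intro hsub
    have hyS : y ∈ S := hsub y (List.mem_cons_self)
    have hsub' : ∀ t, t ∈ l → t ∈ S := fun t ht => hsub t (List.mem_cons_of_mem _ ht)
    have hcount : ∀ t : α, ((y :: l).count t : Int)
        = (l.count t : Int) + (if t = y then 1 else 0) := by
      intro t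
      by_cases h : t = y
      · subst h; rw [List.count_cons_self, if_pos rfl]; push_cast; ring
      · have h2 : ¬ y = t := fun hh => h hh.symm
        simp [h, h2]
    have hsplit :
        S.map (fun t => if key t = k then ((y :: l).count t : Int) else 0)
          = S.map (fun t => (if key t = k then (l.count t : Int) else 0)
              + (if key t = k then (if t = y then (1 : Int) else 0) else 0)) := by
      apply List.map_congr_left
      intro t _
      rw [hcount t]
      by_cases h : key t = k <;> simp [h]
    rw [hsplit, PySem.List.sum_map_add_int, ih hsub', sum_indicator_single key k y S hnd hyS]
    have hc : ((y :: l).map key).count k = (l.map key).count k + (if key y = k then 1 else 0) := by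
      by_cases h : key y = k <;> simp [h]
    rw [hc]
    by_cases h : key y = k <;> simp [h]

-- Master lemma: aggregating the Counter of l through key rebuilds Counter(l.map key).
theorem regroup {α : Type} [DecidableEq α] [BEq α] [LawfulBEq α]
    (l : List α) (key : α → String) :
    (PySem.Dict.counter l).items.foldl
        (fun (d : PySem.Dict String Int) p => d.modify (key p.1) 0 (· + p.2))
        PySem.Dict.empty
      = PySem.Dict.counter (l.map key) := by
  apply PySem.Dict.ext
  set ps := (PySem.Dict.counter l).items with hps
  have hndB : (ps.foldl
      (fun (d : PySem.Dict String Int) p => d.modify (key p.1) 0 (· + p.2))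
      PySem.Dict.empty).keys.Nodup :=
    PySem.Dict.nodup_keys_foldl_modify_key _ _ _ _ _ PySem.Dict.nodup_keys_empty
  rw [PySem.Dict.items_eq_map_keys _ hndB 0,
    PySem.Dict.items_eq_map_keys _ (PySem.Dict.nodup_keys_counter _) 0]
  have hkeys : (ps.foldl
      (fun (d : PySem.Dict String Int) p => d.modify (key p.1) 0 (· + p.2))
      PySem.Dict.empty).keys = (PySem.Dict.counter (l.map key)).keys := by
    rw [PySem.Dict.keys_foldl_modify_key, PySem.Dict.keys_empty, PySem.Dict.keys_counter,
      hps, PySem.Dict.items_counter, List.map_map, PySem.Set.update_nil_left]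
    exact ofList_map_ofList key l
  rw [hkeys]
  apply List.map_congr_left
  intro k _
  have hval : (ps.foldl
      (fun (d : PySem.Dict String Int) p => d.modify (key p.1) 0 (· + p.2))
      PySem.Dict.empty).getD k 0 = (PySem.Dict.counter (l.map key)).getD k 0 := by
    rw [getD_foldl_modify_key_add, PySem.Dict.getD_empty, zero_add, PySem.Dict.getD_counter,
      hps, PySem.Dict.items_counter, List.map_map]
    exact sum_counts_eq_count_map key k _ (PySem.Set.nodup_ofList l) l
      (fun t ht => (PySem.Set.mem_ofList _ _).mpr ht)
  rw [hval]

-- B's single fold over the triple of counters is the triple of per-key folds.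
theorem fold_triple (ps : List ((String × String × String) × Int)) :
    ∀ (b c d : PySem.Dict String Int),
      ps.foldl (fun (t : PySem.Dict String Int × PySem.Dict String Int × PySem.Dict String Int) p =>
          (t.1.modify p.1.1 0 (· + p.2),
           t.2.1.modify (p.1.1 ++ p.1.2.1) 0 (· + p.2),
           t.2.2.modify (p.1.1 ++ p.1.2.1 ++ p.1.2.2) 0 (· + p.2)))
        (b, c, d)
        = (ps.foldl (fun d p => d.modify p.1.1 0 (· + p.2)) b,
           ps.foldl (fun d p => d.modify (p.1.1 ++ p.1.2.1) 0 (· + p.2)) c,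
           ps.foldl (fun d p => d.modify (p.1.1 ++ p.1.2.1 ++ p.1.2.2) 0 (· + p.2)) d) := by
  induction ps with
  | nil => intro b c d; rfl
  | cons p ps ih => intro b c d; simp only [List.foldl_cons, ih]

-- The three instances of the master lemma used by the verdict.
theorem regroup_section (l : List (String × String × String)) :
    (PySem.Dict.counter l).items.foldl
        (fun (d : PySem.Dict String Int) p => d.modify p.1.1 0 (· + p.2))
        PySem.Dict.empty
      = PySem.Dict.counter (l.map (fun t => t.1)) :=
  regroup l (fun t => t.1)

theorem regroup_first_class (l : List (String × String × String)) :
    (PySem.Dict.counter l).items.foldl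
        (fun (d : PySem.Dict String Int) p => d.modify (p.1.1 ++ p.1.2.1) 0 (· + p.2))
        PySem.Dict.empty
      = PySem.Dict.counter (l.map (fun t => t.1 ++ t.2.1)) :=
  regroup l (fun t => t.1 ++ t.2.1)

theorem regroup_subclass (l : List (String × String × String)) :
    (PySem.Dict.counter l).items.foldl
        (fun (d : PySem.Dict String Int) p => d.modify (p.1.1 ++ p.1.2.1 ++ p.1.2.2) 0 (· + p.2))
        PySem.Dict.empty
      = PySem.Dict.counter (l.map (fun t => t.1 ++ t.2.1 ++ t.2.2)) :=
  regroup l (fun t => t.1 ++ t.2.1 ++ t.2.2)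

-- ===== VERDICT (by name: the statement is the Claim_ definition above) =====
theorem class_statistics_spec : Claim_equal_class_statistics := by
  intro list_in _ _
  show class_statistics list_in = class_statistics_alt list_in
  simp only [class_statistics, class_statistics_alt]
  rw [fold_triple, regroup_section, regroup_first_class, regroup_subclass,
    List.map_map, List.map_map, List.map_map]
  rfl
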